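-- pv_equiv track=rewrite | github.com/zsoca000/BeepBoopChat | src/archive/.ipynb_checkpoints/utils-checkpoint.py | convert_to_morse
-- ===== SOURCE A (Python) =====
-- def convert_to_morse(segment_lengths):
--     morse_code = ""
--     for seg_type, length in segment_lengths:
--         if seg_type == '1':
--             if 2000 <= length <= 5000:
--                 morse_code += '.'
--             elif 8000 <= length <= 10000:
--                 morse_code += '-'
--         elif seg_type == '0':
--             if 1000 <= length <= 4000:
--                 morse_code += ''
--             elif 7000 <= length <= 10000:
--                 morse_code += ' '
--             elif 15000 <= length:
--                 morse_code += ' / '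
--     return morse_code
-- ===== SOURCE B (Python) =====
-- # Step-function classification via binary search over sorted breakpoints, per segment type.
-- TABLE = {
--     '1': ([2000, 5001, 8000, 10001], ['', '.', '', '-', '']),
--     '0': ([1000, 4001, 7000, 10001, 15000], ['', '', '', ' ', '', ' / ']),
-- }
--
-- def _bisect_right(bounds, x):
--     lo, hi = 0, len(bounds)
--     while lo < hi:
--         mid = (lo + hi) // 2
--         if x < bounds[mid]:
--             hi = mid
--         else:
--             lo = mid + 1
--     return lo
--
-- def convert_to_morse(segment_lengths):
--     out = []
--     for seg_type, length in segment_lengths: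
--         if seg_type in TABLE:
--             bounds, syms = TABLE[seg_type]
--             out.append(syms[_bisect_right(bounds, length)])
--     return ''.join(out)
-- ===== Notes on version B (the rewrite author's own statement) =====
-- stated objective: alternative
-- what changed: Replaces the if/elif range chain with binary search: each segment type maps to a sorted breakpoint list and step-symbol list, and a hand-rolled bisect_right locates the segment length's step; symbols are collected and joined.
import Mathlib
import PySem

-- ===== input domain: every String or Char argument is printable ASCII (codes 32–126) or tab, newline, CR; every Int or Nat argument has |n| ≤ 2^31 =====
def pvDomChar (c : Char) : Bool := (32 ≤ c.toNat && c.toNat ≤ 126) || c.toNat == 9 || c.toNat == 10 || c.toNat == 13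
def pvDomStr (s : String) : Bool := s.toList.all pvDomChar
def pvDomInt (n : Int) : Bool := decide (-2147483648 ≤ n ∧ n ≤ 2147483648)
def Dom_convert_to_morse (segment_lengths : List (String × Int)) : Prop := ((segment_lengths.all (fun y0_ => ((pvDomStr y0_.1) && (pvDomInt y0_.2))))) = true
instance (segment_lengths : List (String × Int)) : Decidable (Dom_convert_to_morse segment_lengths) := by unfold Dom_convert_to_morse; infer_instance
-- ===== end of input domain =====

-- B classifies each segment by binary search over sorted breakpoints (a step function per type) instead of an if/elif range chain; objective: alternative.
-- ===== PORT A =====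
def convert_to_morse (segment_lengths : List (String × Int)) : String :=
  segment_lengths.foldl (fun morse_code p =>
    let seg_type := p.1
    let length := p.2
    if seg_type == "1" then
      if 2000 ≤ length ∧ length ≤ 5000 then morse_code ++ "."
      else if 8000 ≤ length ∧ length ≤ 10000 then morse_code ++ "-"
      else morse_code
    else if seg_type == "0" then
      if 1000 ≤ length ∧ length ≤ 4000 then morse_code ++ ""
      else if 7000 ≤ length ∧ length ≤ 10000 then morse_code ++ " "
      else if 15000 ≤ length then morse_code ++ " / "
      else morse_code
    else morse_code) ""

-- ===== PORT B =====
-- Source B's TABLE dict: type → (sorted breakpoints, symbols of the resulting steps)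
def morseTable : PySem.Dict String (List Int × List String) :=
  PySem.Dict.mk   -- the literal dict (keys distinct, insertion order kept)
    [("1", ([2000, 5001, 8000, 10001], ["", ".", "", "-", ""])),
     ("0", ([1000, 4001, 7000, 10001, 15000], ["", "", "", " ", "", " / "]))]

-- Source B's hand-written _bisect_right while-loop, with fuel = len(bounds)+1;
-- hi-lo strictly decreases each iteration from len(bounds), so the fuel is never exhausted
-- (totality device only). bounds[mid] is always in range there, so getD is exact.
def bisectLoop (bounds : List Int) (x : Int) : Nat → Nat → Nat → Nat
  | 0, lo, _ => lo
  | fuel + 1, lo, hi =>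
    if lo < hi then
      let mid := (lo + hi) / 2
      if x < bounds.getD mid 0 then bisectLoop bounds x fuel lo mid
      else bisectLoop bounds x fuel (mid + 1) hi
    else lo

def bisect_right (bounds : List Int) (x : Int) : Nat :=
  bisectLoop bounds x (bounds.length + 1) 0 bounds.length

def convert_to_morse_alt (segment_lengths : List (String × Int)) : String :=
  let out := segment_lengths.foldl (fun out p =>
    match PySem.Dict.get? morseTable p.1 with
    | some (bounds, syms) => out ++ [syms.getD (bisect_right bounds p.2) ""]
    | none => out) ([] : List String)
  PySem.Str.join "" out

-- ===== PRECONDITION & SPEC =====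
def Spec_convert_to_morse (segment_lengths : List (String × Int)) (out : String) : Prop := out = convert_to_morse_alt segment_lengths
instance (segment_lengths : List (String × Int)) (out : String) : Decidable (Spec_convert_to_morse segment_lengths out) := by unfold Spec_convert_to_morse; infer_instance

-- ===== CLAIM (what is proved, stated in full; the proofs are below) =====
def Claim_equal_convert_to_morse : Prop := ∀ (segment_lengths : List (String × Int)), Dom_convert_to_morse segment_lengths → Spec_convert_to_morse segment_lengths (convert_to_morse segment_lengths)

-- ===== LEMMAS AND PROOFS =====

theorem bis1 (l : Int) : bisect_right [2000, 5001, 8000, 10001] l =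
    if l < 2000 then 0 else if l < 5001 then 1 else if l < 8000 then 2
    else if l < 10001 then 3 else 4 := by
  norm_num [bisect_right, bisectLoop]
  split_ifs <;> omega

theorem bis0 (l : Int) : bisect_right [1000, 4001, 7000, 10001, 15000] l =
    if l < 1000 then 0 else if l < 4001 then 1 else if l < 7000 then 2
    else if l < 10001 then 3 else if l < 15000 then 4 else 5 := by
  norm_num [bisect_right, bisectLoop]
  split_ifs <;> omega

theorem charsJoinSnoc : ∀ (l : List (List Char)) (cs : List Char),
    PySem.Chars.join [] (l ++ [cs]) = PySem.Chars.join [] l ++ cs := by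
  intro l cs
  induction l with
  | nil => simp [PySem.Chars.join_nil, PySem.Chars.join_singleton]
  | cons a rest ih =>
    cases rest with
    | nil => simp [PySem.Chars.join_singleton, PySem.Chars.join_cons_cons]
    | cons b bs =>
      rw [List.cons_append, PySem.Chars.join_cons_cons, List.cons_append] at *
      rw [PySem.Chars.join_cons_cons]
      simp [ih, List.append_assoc]

theorem joinSnoc (parts : List String) (s : String) :
    PySem.Str.join "" (parts ++ [s]) = PySem.Str.join "" parts ++ s := by
  simp [PySem.Str.join, charsJoinSnoc]

-- per-segment contribution of B
def segSym (p : String × Int) : Option String :=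
  match PySem.Dict.get? morseTable p.1 with
  | some (bounds, syms) => some (syms.getD (bisect_right bounds p.2) "")
  | none => none

-- A's loop body appends exactly the symbol B's binary search selects (or nothing)
theorem stepA (acc : String) (p : String × Int) :
    (if p.1 == "1" then
      if 2000 ≤ p.2 ∧ p.2 ≤ 5000 then acc ++ "."
      else if 8000 ≤ p.2 ∧ p.2 ≤ 10000 then acc ++ "-"
      else acc
    else if p.1 == "0" then
      if 1000 ≤ p.2 ∧ p.2 ≤ 4000 then acc ++ ""
      else if 7000 ≤ p.2 ∧ p.2 ≤ 10000 then acc ++ " "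
      else if 15000 ≤ p.2 then acc ++ " / "
      else acc
    else acc) = (match segSym p with | some s => acc ++ s | none => acc) := by
  rcases p with ⟨t, l⟩
  by_cases h1 : t = "1"
  · subst h1
    have hseg : segSym ("1", l) =
        some (["", ".", "", "-", ""].getD (bisect_right [2000, 5001, 8000, 10001] l) "") := rfl
    simp only [hseg, beq_iff_eq]
    rw [bis1 l]
    norm_num
    split_ifs <;> first | (exfalso; omega) | simp
  · by_cases h0 : t = "0"
    · subst h0
      have hseg : segSym ("0", l) =
          some (["", "", "", " ", "", " / "].getD (bisect_right [1000, 4001, 7000, 10001, 15000] l) "") := rfl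
      simp only [hseg, beq_iff_eq]
      rw [bis0 l]
      norm_num
      split_ifs <;> first | (exfalso; omega) | simp
    · have hseg : segSym (t, l) = none := by
        simp [segSym, morseTable, PySem.Dict.get?, Ne.symm h1, Ne.symm h0]
      simp only [hseg, beq_iff_eq, h1, h0]
      simp

theorem mainInv : ∀ (sl : List (String × Int)) (parts : List String),
    sl.foldl (fun morse_code p =>
      let seg_type := p.1
      let length := p.2
      if seg_type == "1" then
        if 2000 ≤ length ∧ length ≤ 5000 then morse_code ++ "."
        else if 8000 ≤ length ∧ length ≤ 10000 then morse_code ++ "-"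
        else morse_code
      else if seg_type == "0" then
        if 1000 ≤ length ∧ length ≤ 4000 then morse_code ++ ""
        else if 7000 ≤ length ∧ length ≤ 10000 then morse_code ++ " "
        else if 15000 ≤ length then morse_code ++ " / "
        else morse_code
      else morse_code) (PySem.Str.join "" parts)
    = PySem.Str.join "" (sl.foldl (fun out p =>
        match PySem.Dict.get? morseTable p.1 with
        | some (bounds, syms) => out ++ [syms.getD (bisect_right bounds p.2) ""]
        | none => out) parts) := by
  intro sl
  induction sl with
  | nil => intro parts; rfl
  | cons p rest ih =>
    intro parts
    rw [List.foldl_cons, List.foldl_cons, stepA]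
    cases h : PySem.Dict.get? morseTable p.1 with
    | none => simp only [segSym, h]; exact ih parts
    | some v =>
      rcases v with ⟨bounds, syms⟩
      simp only [segSym, h]
      rw [← joinSnoc]
      exact ih (parts ++ [syms.getD (bisect_right bounds p.2) ""])

-- ===== VERDICT (by name: the statement is the Claim_ definition above) =====
theorem convert_to_morse_spec : Claim_equal_convert_to_morse := by
  intro sl _
  unfold Spec_convert_to_morse convert_to_morse convert_to_morse_alt
  have h0 : PySem.Str.join "" ([] : List String) = "" := by
    simp [PySem.Str.join, PySem.Chars.join_nil]
  have h := mainInv sl []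
  rw [h0] at h
  exact h
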